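-- pv_equiv track=rewrite | github.com/Semooze/dWise | dwise/utils.py | make_hashtag_count
-- ===== SOURCE A (Python) =====
-- from typing import List, Dict, Union
--
-- def make_hashtag_count(words: List) -> Dict:
--     result: Dict = dict()
--     for word in words:
--         if word[0] != '#':
--             continue
--         if len(word) == 1:
--             continue
--         if result.get(word):
--             result[word] += 1
--         else:
--             result[word] = 1
--     return result
-- ===== SOURCE B (Python) =====
-- def make_hashtag_count(words):
--     filtered = [w for w in words if w[0] == '#' and len(w) > 1]
--     return {w: filtered.count(w) for w in dict.fromkeys(filtered)}
-- ===== Notes on version B (the rewrite author's own statement) =====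
-- stated objective: alternative
-- what changed: Replaces the single-pass dict-get/increment counting loop with filter-once, ordered dedup of the kept hashtags, then one count per distinct key.
import Mathlib
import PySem

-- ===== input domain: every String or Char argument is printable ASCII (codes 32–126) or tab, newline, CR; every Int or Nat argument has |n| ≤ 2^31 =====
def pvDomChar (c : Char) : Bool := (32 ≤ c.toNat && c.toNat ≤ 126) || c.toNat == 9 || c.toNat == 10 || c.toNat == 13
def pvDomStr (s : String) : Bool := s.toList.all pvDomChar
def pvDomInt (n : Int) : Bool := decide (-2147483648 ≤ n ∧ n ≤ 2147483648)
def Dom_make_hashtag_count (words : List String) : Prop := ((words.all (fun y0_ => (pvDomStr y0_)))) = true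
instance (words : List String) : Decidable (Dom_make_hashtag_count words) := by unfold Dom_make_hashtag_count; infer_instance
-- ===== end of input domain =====

-- B replaces A's single-pass get/increment counting loop by filter-once, ordered dedup, one count per distinct key (alternative decomposition, same results).

-- ===== PORT A =====
def make_hashtag_count (words : List String) : List (String × Int) :=
  (words.foldl (fun result word =>
    match PySem.Str.pyGet? word 0 with
    | none => result        -- word[0] raises IndexError on "" ; excluded by Pre_
    | some c =>
      if c ≠ '#' then result
      else if PySem.Str.len word = 1 then result
      else
        match PySem.Dict.get? result word with
        | some v => if v ≠ 0 then result.insert word (v + 1) else result.insert word 1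
        | none => result.insert word 1) PySem.Dict.empty).items

-- ===== PORT B =====
def keepHashtag (w : String) : Bool :=
  (PySem.Str.pyGet? w 0 == some '#') && decide (1 < PySem.Str.len w)

def make_hashtag_count_alt (words : List String) : List (String × Int) :=
  let filtered := words.filter keepHashtag
  (PySem.List.dedup filtered).map (fun w => (w, (filtered.count w : Int)))

-- ===== PRECONDITION & SPEC =====
-- Pre_ excludes lists containing an empty string, on which A (and B) raise IndexError at word[0].
def Pre_make_hashtag_count (words : List String) : Prop := ∀ w ∈ words, w ≠ ""
instance (words : List String) : Decidable (Pre_make_hashtag_count words) := by unfold Pre_make_hashtag_count; infer_instance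
def pvWitness_make_hashtag_count : List String := ["#a", "b", "#a", "#", "#bb"]

def Spec_make_hashtag_count (words : List String) (out : List (String × Int)) : Prop := out = make_hashtag_count_alt words
instance (words : List String) (out : List (String × Int)) : Decidable (Spec_make_hashtag_count words out) := by unfold Spec_make_hashtag_count; infer_instance

-- ===== CLAIM (what is proved, stated in full; the proofs are below) =====
def Claim_equal_make_hashtag_count : Prop := ∀ (words : List String), Dom_make_hashtag_count words → Pre_make_hashtag_count words → Spec_make_hashtag_count words (make_hashtag_count words)

-- ===== LEMMAS AND PROOFS =====

-- A's loop body is extensionally the standard counter step, guarded by the filter predicate.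
theorem step_eq (d : PySem.Dict String Int) (w : String) (hw : w ≠ "") :
    (match PySem.Str.pyGet? w 0 with
    | none => d
    | some c =>
      if c ≠ '#' then d
      else if PySem.Str.len w = 1 then d
      else
        match PySem.Dict.get? d w with
        | some v => if v ≠ 0 then d.insert w (v + 1) else d.insert w 1
        | none => d.insert w 1)
    = if keepHashtag w then d.insert w (d.getD w 0 + 1) else d := by
  have hne : w.toList ≠ [] := by
    intro h
    apply hw
    have := congrArg String.ofList h
    simpa using this
  have hlen : 0 < w.length := by
    have := List.length_pos_iff.mpr hne
    simpa using this
  unfold keepHashtag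
  cases hg : PySem.Str.pyGet? w 0 with
  | none => simp
  | some c =>
    by_cases hc : c = '#'
    · subst hc
      by_cases h1 : w.length = 1
      · simp [PySem.Str.len_eq, h1]
      · have h2 : 1 < w.length := by omega
        cases hget : PySem.Dict.get? d w with
        | none => simp [PySem.Str.len_eq, h1, h2, hget, PySem.Dict.getD]
        | some v =>
          by_cases hv : v = 0
          · simp [PySem.Str.len_eq, h1, h2, hget, hv, PySem.Dict.getD]
          · simp [PySem.Str.len_eq, h1, h2, hget, hv, PySem.Dict.getD]
    · simp [hc]

theorem make_hashtag_count_spec : Claim_equal_make_hashtag_count := by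
  intro words _ hpre
  unfold Spec_make_hashtag_count make_hashtag_count make_hashtag_count_alt
  have h := PySem.List.foldl_congr_mem words
      (fun result word =>
        match PySem.Str.pyGet? word 0 with
        | none => result
        | some c =>
          if c ≠ '#' then result
          else if PySem.Str.len word = 1 then result
          else
            match PySem.Dict.get? result word with
            | some v => if v ≠ 0 then result.insert word (v + 1) else result.insert word 1
            | none => result.insert word 1)
      (fun d w => if keepHashtag w then d.insert w (d.getD w 0 + 1) else d)
      PySem.Dict.empty
      (fun d w hw => step_eq d w (hpre w hw))
  rw [h, PySem.List.foldl_if_eq_foldl_filter,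
      PySem.Dict.foldl_insert_getD_add_one_eq_counter, PySem.Dict.items_counter]
  simp only [PySem.List.dedup_eq_ofList]
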